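-- pv_equiv track=rewrite | github.com/CMS-InfoSec/Aether_2 | release_manifest.py | _diff_versions
-- ===== SOURCE A (Python) =====
-- from typing import Any, Dict, Iterable, Iterator, List, Optional, Tuple, cast
--
-- def _diff_versions(category: str, expected: Dict[str, str], actual: Dict[str, str]) -> List[str]:
--     """Compare expected and actual mappings and return human readable diffs."""
--
--     messages: List[str] = []
--     missing = sorted(set(expected) - set(actual))
--     extra = sorted(set(actual) - set(expected))
--     changed = sorted({key for key in expected if key in actual and expected[key] != actual[key]})
--
--     for key in missing:
--         messages.append(f"{category}: missing '{key}' (expected {expected[key]!r})")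
--     for key in extra:
--         messages.append(f"{category}: unexpected entry '{key}' with version {actual[key]!r}")
--     for key in changed:
--         messages.append(
--             f"{category}: version mismatch for '{key}' (expected {expected[key]!r}, found {actual[key]!r})"
--         )
--     return messages
-- ===== SOURCE B (Python) =====
-- def _diff_versions(category, expected, actual):
--     """Compare expected and actual mappings and return human readable diffs.
--
--     Two-pointer merge of the two sorted key lists: a key only advanced on the
--     expected side is missing, only on the actual side is unexpected, advanced on
--     both sides with differing values is a mismatch.  No set operations and no
--     membership tests are used.
--     """
--     ek = sorted(expected)
--     ak = sorted(actual)
--     missing, extra, changed = [], [], []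
--     i = j = 0
--     while i < len(ek) or j < len(ak):
--         if j >= len(ak) or (i < len(ek) and ek[i] < ak[j]):
--             k = ek[i]
--             missing.append(f"{category}: missing '{k}' (expected {expected[k]!r})")
--             i += 1
--         elif i >= len(ek) or ak[j] < ek[i]:
--             k = ak[j]
--             extra.append(f"{category}: unexpected entry '{k}' with version {actual[k]!r}")
--             j += 1
--         else:
--             k = ek[i]
--             if expected[k] != actual[k]:
--                 changed.append(
--                     f"{category}: version mismatch for '{k}' (expected {expected[k]!r}, found {actual[k]!r})"
--                 )
--             i += 1
--             j += 1
--     return missing + extra + changed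
-- ===== Notes on version B (the rewrite author's own statement) =====
-- stated objective: alternative
-- what changed: B replaces A's three set-difference/comprehension computations by a two-pointer merge of the two independently sorted key lists, classifying each key (missing/unexpected/mismatch) by the merge comparison alone, with no set operations or membership tests.
import Mathlib
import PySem

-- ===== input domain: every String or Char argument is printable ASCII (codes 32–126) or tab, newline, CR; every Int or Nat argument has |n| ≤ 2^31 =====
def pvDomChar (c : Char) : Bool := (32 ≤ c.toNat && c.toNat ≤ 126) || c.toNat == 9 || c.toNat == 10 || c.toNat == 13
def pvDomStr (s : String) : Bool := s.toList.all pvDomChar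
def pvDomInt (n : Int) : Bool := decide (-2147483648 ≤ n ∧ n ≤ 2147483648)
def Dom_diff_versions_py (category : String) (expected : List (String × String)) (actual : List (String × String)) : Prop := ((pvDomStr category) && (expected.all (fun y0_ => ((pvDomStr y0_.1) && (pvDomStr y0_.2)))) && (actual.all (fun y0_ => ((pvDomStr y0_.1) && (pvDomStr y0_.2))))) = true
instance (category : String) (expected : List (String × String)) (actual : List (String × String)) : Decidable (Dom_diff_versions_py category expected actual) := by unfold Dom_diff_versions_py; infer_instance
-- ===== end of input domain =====

-- B replaces A's three set-difference computations by a two-pointer merge of the two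
-- sorted key lists, classifying each key by the merge comparison alone (objective: alternative).
-- The dict arguments arrive as item lists; both ports rebuild them with PySem.Dict.ofList.

-- Python's repr(s): hand-ported, exact on the stated domain (printable ASCII plus tab/newline/CR):
-- the quote is '"' iff s contains '\'' and no '"'; backslash, tab, newline, CR and the quote are escaped.
def pyReprStr (s : String) : String :=
  let cs := s.toList
  let q : Char := if cs.contains '\'' && !cs.contains '"' then '"' else '\''
  String.ofList (q :: (cs.flatMap (fun c =>
    if c = '\\' then ['\\', '\\']
    else if c = '\t' then ['\\', 't']
    else if c = '\n' then ['\\', 'n']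
    else if c = '\r' then ['\\', 'r']
    else if c = q then ['\\', q]
    else [c])) ++ [q])

-- the three f-string message formats (shared by both ports verbatim)
def msgMissing (category k v : String) : String :=
  category ++ ": missing '" ++ k ++ "' (expected " ++ pyReprStr v ++ ")"
def msgExtra (category k v : String) : String :=
  category ++ ": unexpected entry '" ++ k ++ "' with version " ++ pyReprStr v
def msgChanged (category k v w : String) : String :=
  category ++ ": version mismatch for '" ++ k ++ "' (expected " ++ pyReprStr v ++ ", found " ++ pyReprStr w ++ ")"

-- ===== PORT A =====
def diff_versions_py (category : String) (expected : List (String × String)) (actual : List (String × String)) : List String :=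
  let e := PySem.Dict.ofList expected
  let a := PySem.Dict.ofList actual
  let missing := PySem.List.sorted (PySem.Set.diff (PySem.Set.ofList e.keys) (PySem.Set.ofList a.keys)) (fun k => k) false
  let extra := PySem.List.sorted (PySem.Set.diff (PySem.Set.ofList a.keys) (PySem.Set.ofList e.keys)) (fun k => k) false
  let changed := PySem.List.sorted (PySem.Set.ofList (e.keys.filter (fun k => a.contains k && !(e.getD k "" == a.getD k "")))) (fun k => k) false
  let m1 := missing.foldl (fun ms k => ms ++ [msgMissing category k (e.getD k "")]) ([] : List String)
  let m2 := extra.foldl (fun ms k => ms ++ [msgExtra category k (a.getD k "")]) m1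
  changed.foldl (fun ms k => ms ++ [msgChanged category k (e.getD k "") (a.getD k "")]) m2

-- ===== PORT B =====
-- B's while loop over indices i/j into the sorted key lists, transcribed as the
-- obvious recursion over the two list suffixes; the three buckets are the state.
def mergeDiff (category : String) (e a : PySem.Dict String String) :
    List String → List String → List String × List String × List String
  | [], [] => ([], [], [])
  | x :: xs, [] =>
    let r := mergeDiff category e a xs []
    (msgMissing category x (e.getD x "") :: r.1, r.2.1, r.2.2)
  | [], y :: ys =>
    let r := mergeDiff category e a [] ys
    (r.1, msgExtra category y (a.getD y "") :: r.2.1, r.2.2)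
  | x :: xs, y :: ys =>
    if x < y then
      let r := mergeDiff category e a xs (y :: ys)
      (msgMissing category x (e.getD x "") :: r.1, r.2.1, r.2.2)
    else if y < x then
      let r := mergeDiff category e a (x :: xs) ys
      (r.1, msgExtra category y (a.getD y "") :: r.2.1, r.2.2)
    else
      let r := mergeDiff category e a xs ys
      if !(e.getD x "" == a.getD x "") then
        (r.1, r.2.1, msgChanged category x (e.getD x "") (a.getD x "") :: r.2.2)
      else r
  termination_by xs ys => xs.length + ys.length

def diff_versions_py_alt (category : String) (expected : List (String × String)) (actual : List (String × String)) : List String :=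
  let e := PySem.Dict.ofList expected
  let a := PySem.Dict.ofList actual
  let ek := PySem.List.sorted e.keys (fun k => k) false
  let ak := PySem.List.sorted a.keys (fun k => k) false
  let r := mergeDiff category e a ek ak
  r.1 ++ r.2.1 ++ r.2.2

-- ===== PRECONDITION & SPEC =====
def Spec_diff_versions_py (category : String) (expected : List (String × String)) (actual : List (String × String)) (out : List String) : Prop := out = diff_versions_py_alt category expected actual
instance (category : String) (expected : List (String × String)) (actual : List (String × String)) (out : List String) : Decidable (Spec_diff_versions_py category expected actual out) := by unfold Spec_diff_versions_py; infer_instance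

-- ===== CLAIM (what is proved, stated in full; the proofs are below) =====
def Claim_equal_diff_versions_py : Prop := ∀ (category : String) (expected : List (String × String)) (actual : List (String × String)), Dom_diff_versions_py category expected actual → Spec_diff_versions_py category expected actual (diff_versions_py category expected actual)

-- ===== LEMMAS AND PROOFS =====

-- the two-pointer merge over strictly sorted key lists computes the three filters
theorem mergeDiff_eq (category : String) (e a : PySem.Dict String String)
    (xs ys : List String) (hx : xs.Pairwise (· < ·)) (hy : ys.Pairwise (· < ·)) :
    mergeDiff category e a xs ys =
      ((xs.filter (fun k => !ys.contains k)).map (fun k => msgMissing category k (e.getD k "")),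
       (ys.filter (fun k => !xs.contains k)).map (fun k => msgExtra category k (a.getD k "")),
       (xs.filter (fun k => ys.contains k && !(e.getD k "" == a.getD k ""))).map
         (fun k => msgChanged category k (e.getD k "") (a.getD k ""))) := by
  induction xs, ys using mergeDiff.induct (category := category) (e := e) (a := a) with
  | case1 => simp [mergeDiff]
  | case2 x xs ih =>
    have hx' := (List.pairwise_cons.mp hx).2
    simp [mergeDiff, ih hx' hy]
  | case3 y ys ih =>
    have hy' := (List.pairwise_cons.mp hy).2
    simp [mergeDiff, ih hx hy']
  | case4 x xs y ys hlt ih =>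
    have hx' := (List.pairwise_cons.mp hx).2
    have hne : x ≠ y := ne_of_lt hlt
    have hxys : x ∉ ys := fun h =>
      absurd (lt_trans hlt ((List.pairwise_cons.mp hy).1 _ h)) (lt_irrefl x)
    have hzx : ∀ z ∈ y :: ys, z ≠ x := by
      intro z hz
      rcases List.mem_cons.mp hz with rfl | hz
      · exact fun h => absurd (h ▸ hlt) (lt_irrefl _)
      · have hyz := (List.pairwise_cons.mp hy).1 z hz
        exact fun h => absurd (h ▸ lt_trans hlt hyz) (lt_irrefl _)
    have hF1 : (x :: xs).filter (fun k => !(y :: ys).contains k)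
        = x :: xs.filter (fun k => !(y :: ys).contains k) :=
      List.filter_cons_of_pos (by simp [hne, hxys])
    have hF2 : (y :: ys).filter (fun k => !(x :: xs).contains k)
        = (y :: ys).filter (fun k => !xs.contains k) := by
      apply List.filter_congr; intro z hz; simp [hzx z hz]
    have hF3 : (x :: xs).filter (fun k => (y :: ys).contains k && !(e.getD k "" == a.getD k ""))
        = xs.filter (fun k => (y :: ys).contains k && !(e.getD k "" == a.getD k "")) :=
      List.filter_cons_of_neg (by simp [hne, hxys])
    rw [mergeDiff]; simp only [if_pos hlt]; rw [ih hx' hy, hF1, hF2, hF3]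
    simp
  | case5 x xs y ys hnlt hlt ih =>
    have hy' := (List.pairwise_cons.mp hy).2
    have hne : y ≠ x := ne_of_lt hlt
    have hyxs : y ∉ xs := fun h =>
      absurd (lt_trans hlt ((List.pairwise_cons.mp hx).1 _ h)) (lt_irrefl y)
    have hzy : ∀ z ∈ x :: xs, z ≠ y := by
      intro z hz
      rcases List.mem_cons.mp hz with rfl | hz
      · exact fun h => absurd (h ▸ hlt) (lt_irrefl _)
      · have hxz := (List.pairwise_cons.mp hx).1 z hz
        exact fun h => absurd (h ▸ lt_trans hlt hxz) (lt_irrefl _)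
    have hF1 : (x :: xs).filter (fun k => !(y :: ys).contains k)
        = (x :: xs).filter (fun k => !ys.contains k) := by
      apply List.filter_congr; intro z hz; simp [hzy z hz]
    have hF2 : (y :: ys).filter (fun k => !(x :: xs).contains k)
        = y :: ys.filter (fun k => !(x :: xs).contains k) :=
      List.filter_cons_of_pos (by simp [hne, hyxs])
    have hF3 : (x :: xs).filter (fun k => (y :: ys).contains k && !(e.getD k "" == a.getD k ""))
        = (x :: xs).filter (fun k => ys.contains k && !(e.getD k "" == a.getD k "")) := by
      apply List.filter_congr; intro z hz; simp [hzy z hz]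
    rw [mergeDiff]; simp only [if_neg hnlt, if_pos hlt]
    rw [ih hx hy', hF1, hF2, hF3]
    simp
  | case6 x xs y ys hnlt hnlt' hv ih =>
    have heq : x = y := le_antisymm (not_lt.mp hnlt') (not_lt.mp hnlt)
    subst heq
    have hx' := (List.pairwise_cons.mp hx).2
    have hy' := (List.pairwise_cons.mp hy).2
    have hxmem : ∀ z ∈ xs, z ≠ x := by
      intro z hz
      have := (List.pairwise_cons.mp hx).1 z hz
      exact fun h => absurd (h ▸ this) (lt_irrefl _)
    have hymem : ∀ z ∈ ys, z ≠ x := by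
      intro z hz
      have := (List.pairwise_cons.mp hy).1 z hz
      exact fun h => absurd (h ▸ this) (lt_irrefl _)
    have hF1 : (x :: xs).filter (fun k => !(x :: ys).contains k)
        = xs.filter (fun k => !ys.contains k) := by
      rw [List.filter_cons_of_neg (by simp)]
      apply List.filter_congr; intro z hz; simp [hxmem z hz]
    have hF2 : (x :: ys).filter (fun k => !(x :: xs).contains k)
        = ys.filter (fun k => !xs.contains k) := by
      rw [List.filter_cons_of_neg (by simp)]
      apply List.filter_congr; intro z hz; simp [hymem z hz]
    have hF3 : (x :: xs).filter (fun k => (x :: ys).contains k && !(e.getD k "" == a.getD k ""))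
        = x :: xs.filter (fun k => ys.contains k && !(e.getD k "" == a.getD k "")) := by
      rw [List.filter_cons_of_pos (by simp [hv])]
      congr 1
      apply List.filter_congr; intro z hz; simp [hxmem z hz]
    rw [mergeDiff]
    simp only [if_neg hnlt, if_pos hv]
    rw [ih hx' hy', hF1, hF2, hF3]
    simp
  | case7 x xs y ys hnlt hnlt' hv ih =>
    have heq : x = y := le_antisymm (not_lt.mp hnlt') (not_lt.mp hnlt)
    subst heq
    have hx' := (List.pairwise_cons.mp hx).2
    have hy' := (List.pairwise_cons.mp hy).2
    have hxmem : ∀ z ∈ xs, z ≠ x := by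
      intro z hz
      have := (List.pairwise_cons.mp hx).1 z hz
      exact fun h => absurd (h ▸ this) (lt_irrefl _)
    have hymem : ∀ z ∈ ys, z ≠ x := by
      intro z hz
      have := (List.pairwise_cons.mp hy).1 z hz
      exact fun h => absurd (h ▸ this) (lt_irrefl _)
    have hF1 : (x :: xs).filter (fun k => !(x :: ys).contains k)
        = xs.filter (fun k => !ys.contains k) := by
      rw [List.filter_cons_of_neg (by simp)]
      apply List.filter_congr; intro z hz; simp [hxmem z hz]
    have hF2 : (x :: ys).filter (fun k => !(x :: xs).contains k)
        = ys.filter (fun k => !xs.contains k) := by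
      rw [List.filter_cons_of_neg (by simp)]
      apply List.filter_congr; intro z hz; simp [hymem z hz]
    have hF3 : (x :: xs).filter (fun k => (x :: ys).contains k && !(e.getD k "" == a.getD k ""))
        = xs.filter (fun k => ys.contains k && !(e.getD k "" == a.getD k "")) := by
      rw [List.filter_cons_of_neg (by simpa using hv)]
      apply List.filter_congr; intro z hz; simp [hxmem z hz]
    rw [mergeDiff]
    simp only [if_neg hnlt, if_neg hv]
    rw [ih hx' hy', hF1, hF2, hF3]

-- a sorted nodup list S is the p-filter of the sorted nodup base whenever membership says so
theorem sorted_eq_filter_sorted (p : String → Bool) (S base : List String)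
    (hS : S.Nodup) (hb : base.Nodup)
    (hmem : ∀ k, k ∈ S ↔ (p k = true ∧ k ∈ base)) :
    PySem.List.sorted S (fun k => k) false
      = (PySem.List.sorted base (fun k => k) false).filter p := by
  have hU : (PySem.List.sorted base (fun k => k) false).Pairwise (· < ·) := by
    have h := PySem.List.sorted_ofList_pairwise_lt (xs := base)
    rwa [PySem.Set.ofList_eq_self_of_nodup base hb] at h
  have hUn : (PySem.List.sorted base (fun k => k) false).Nodup :=
    ((PySem.List.sorted_perm base (fun k => k) false).nodup_iff).mpr hb
  apply PySem.List.sorted_eq_of_perm_of_pairwise_lt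
  · rw [List.perm_ext_iff_of_nodup (hUn.filter p) hS]
    intro k
    simp only [List.mem_filter, PySem.List.mem_sorted, hmem k]
    tauto
  · exact List.Pairwise.filter p hU

-- ===== VERDICT (by name: the statement is the Claim_ definition above) =====
theorem diff_versions_py_spec : Claim_equal_diff_versions_py := by
  intro category expected actual _hdom
  unfold Spec_diff_versions_py diff_versions_py diff_versions_py_alt
  dsimp only
  set e := PySem.Dict.ofList expected with he
  set a := PySem.Dict.ofList actual with ha
  have hek : e.keys.Nodup := PySem.Dict.nodup_keys_ofList expected
  have hak : a.keys.Nodup := PySem.Dict.nodup_keys_ofList actual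
  set ek := PySem.List.sorted e.keys (fun k => k) false with hekS
  set ak := PySem.List.sorted a.keys (fun k => k) false with hakS
  have hekP : ek.Pairwise (· < ·) := by
    have h := PySem.List.sorted_ofList_pairwise_lt (xs := e.keys)
    rwa [PySem.Set.ofList_eq_self_of_nodup e.keys hek] at h
  have hakP : ak.Pairwise (· < ·) := by
    have h := PySem.List.sorted_ofList_pairwise_lt (xs := a.keys)
    rwa [PySem.Set.ofList_eq_self_of_nodup a.keys hak] at h
  have hmemak : ∀ k, (ak.contains k = true) ↔ a.contains k = true := by
    intro k
    rw [List.contains_iff_mem, hakS, PySem.List.mem_sorted,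
      ← PySem.Dict.contains_iff_mem_keys (d := a) (k := k)]
  have hmemek : ∀ k, (ek.contains k = true) ↔ e.contains k = true := by
    intro k
    rw [List.contains_iff_mem, hekS, PySem.List.mem_sorted,
      ← PySem.Dict.contains_iff_mem_keys (d := e) (k := k)]
  rw [mergeDiff_eq category e a ek ak hekP hakP]
  simp only [PySem.List.foldl_append_singleton_eq_map, List.nil_append, List.append_assoc]
  have hmiss : PySem.List.sorted (PySem.Set.diff (PySem.Set.ofList e.keys) (PySem.Set.ofList a.keys)) (fun k => k) false
      = ek.filter (fun k => !ak.contains k) := by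
    rw [hekS]
    apply sorted_eq_filter_sorted _ _ _
      (PySem.Set.nodup_diff (PySem.Set.ofList e.keys) (PySem.Set.ofList a.keys) (PySem.Set.nodup_ofList e.keys)) hek
    intro k
    simp only [PySem.Set.mem_diff, PySem.Set.mem_ofList, Bool.not_eq_true']
    constructor
    · rintro ⟨hke, hka⟩
      refine ⟨?_, hke⟩
      rw [Bool.eq_false_iff]
      intro h
      exact hka (by rw [← PySem.Dict.contains_iff_mem_keys (d := a) (k := k)]; exact (hmemak k).mp h)
    · rintro ⟨hp, hke⟩
      refine ⟨hke, ?_⟩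
      intro hka
      have : ak.contains k = true := (hmemak k).mpr (by rw [← PySem.Dict.contains_iff_mem_keys (d := a) (k := k)] at hka; exact hka)
      rw [List.contains_iff_mem] at this
      simp_all
  have hextra : PySem.List.sorted (PySem.Set.diff (PySem.Set.ofList a.keys) (PySem.Set.ofList e.keys)) (fun k => k) false
      = ak.filter (fun k => !ek.contains k) := by
    rw [hakS]
    apply sorted_eq_filter_sorted _ _ _
      (PySem.Set.nodup_diff (PySem.Set.ofList a.keys) (PySem.Set.ofList e.keys) (PySem.Set.nodup_ofList a.keys)) hak
    intro k
    simp only [PySem.Set.mem_diff, PySem.Set.mem_ofList, Bool.not_eq_true']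
    constructor
    · rintro ⟨hka, hke⟩
      refine ⟨?_, hka⟩
      rw [Bool.eq_false_iff]
      intro h
      exact hke (by rw [← PySem.Dict.contains_iff_mem_keys (d := e) (k := k)]; exact (hmemek k).mp h)
    · rintro ⟨hp, hka⟩
      refine ⟨hka, ?_⟩
      intro hke
      have : ek.contains k = true := (hmemek k).mpr (by rw [← PySem.Dict.contains_iff_mem_keys (d := e) (k := k)] at hke; exact hke)
      rw [List.contains_iff_mem] at this
      simp_all
  have hchanged : PySem.List.sorted (PySem.Set.ofList (e.keys.filter (fun k => a.contains k && !(e.getD k "" == a.getD k "")))) (fun k => k) false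
      = ek.filter (fun k => ak.contains k && !(e.getD k "" == a.getD k "")) := by
    rw [hekS]
    apply sorted_eq_filter_sorted _ _ _ (PySem.Set.nodup_ofList _) hek
    intro k
    simp only [PySem.Set.mem_ofList, List.mem_filter, Bool.and_eq_true]
    constructor
    · rintro ⟨hke, hca, hv⟩
      exact ⟨⟨(hmemak k).mpr hca, hv⟩, hke⟩
    · rintro ⟨⟨hca, hv⟩, hke⟩
      exact ⟨hke, (hmemak k).mp hca, hv⟩
  rw [hmiss, hextra, hchanged]
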